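-- pv_equiv track=rewrite | github.com/dimtsi/AoC2021 | Day18/day18.py | is_explosive
-- ===== SOURCE A (Python) =====
-- from typing import (
--     List,
--     Tuple,
--     Set,
--     Dict,
--     Iterable,
--     DefaultDict,
--     Optional,
--     Union,
--     Generator,
-- )
--
-- def is_explosive(
--     string,
-- ) -> Tuple[bool, Tuple[Optional[int], Optional[int]]]:
--     opening_brackets_stack = []
--     is_exploding = False
--     explode_start = None
--     explode_end = None
--     for i, char in enumerate(string):
--         if char == "[":
--             opening_brackets_stack.append(char)
--             if len(opening_brackets_stack) == 5:
--                 explode_start = i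
--                 is_exploding = True
--                 continue
--         elif char == "]":
--             opening_brackets_stack.pop()
--             if is_exploding:
--                 explode_end = i
--                 break
--
--     return is_exploding, (explode_start, explode_end)
-- ===== SOURCE B (Python) =====
-- def is_explosive(string):
--     # Declarative characterization instead of stack simulation: the explode start is
--     # the first '[' whose prefix contains exactly 4 more '[' than ']'; the end is the
--     # first ']' after it.
--     chars = list(string)
--     candidates = [i for i, c in enumerate(chars)
--                   if c == "[" and chars[:i].count("[") - chars[:i].count("]") == 4]
--     if not candidates:
--         return False, (None, None)
--     start = candidates[0]
--     end = string.find("]", start + 1)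
--     return True, (start, end if end != -1 else None)
-- ===== Notes on version B (the rewrite author's own statement) =====
-- stated objective: alternative
-- what changed: A's fused stateful scan (explicit bracket stack, is_exploding flag, carried start/end slots) is replaced by a stateless declarative characterization: the explode start is the first position whose character is '[' and whose prefix holds exactly 4 more '[' than ']', computed by filtering all positions with per-position prefix counts, after which str.find jumps to the closing ']'; no stack, flag or depth counter is maintained.
import Mathlib
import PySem

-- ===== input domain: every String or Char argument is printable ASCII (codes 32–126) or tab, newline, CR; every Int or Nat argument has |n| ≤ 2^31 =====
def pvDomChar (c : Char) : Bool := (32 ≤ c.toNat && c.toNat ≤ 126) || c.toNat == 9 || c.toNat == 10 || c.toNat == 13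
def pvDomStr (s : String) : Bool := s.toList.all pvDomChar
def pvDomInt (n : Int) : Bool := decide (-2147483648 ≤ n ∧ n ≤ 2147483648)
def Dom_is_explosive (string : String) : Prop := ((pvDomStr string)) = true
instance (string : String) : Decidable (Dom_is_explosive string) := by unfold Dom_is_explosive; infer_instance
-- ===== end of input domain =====

-- B replaces A's fused stack-driven scan by a stateless characterization: filter all
-- positions whose char is '[' with a prefix holding exactly 4 more '[' than ']', take the
-- first, then str.find the closing ']' (objective: alternative; not faster).


-- ===== PORT A =====
-- literal transliteration of A's loop: stack of '[' chars, is_exploding flag, start/end slots.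
def pvA_loop : List Char → Int → List Char → Bool → Option Int → Option Int →
    Bool × (Option Int × Option Int)
  | [], _, _, ex, s, e => (ex, (s, e))
  | c :: rest, i, stack, ex, s, e =>
    if c = '[' then
      let stack' := stack ++ ['[']          -- opening_brackets_stack.append(char)
      if stack'.length = 5 then pvA_loop rest (i + 1) stack' true (some i) e
      else pvA_loop rest (i + 1) stack' ex s e
    else if c = ']' then
      match PySem.List.pop? stack with      -- opening_brackets_stack.pop()
      | none => (ex, (s, e))                -- Python raises IndexError here; excluded by Pre_
      | some (_, stack') =>
        if ex then (ex, (s, some i))        -- explode_end = i; break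
        else pvA_loop rest (i + 1) stack' ex s e
    else pvA_loop rest (i + 1) stack ex s e

def is_explosive (string : String) : Bool × (Option Int × Option Int) :=
  pvA_loop string.toList 0 [] false none none

-- ===== PORT B =====
-- literal transliteration of B: chars = list(string); candidates = the comprehension
-- filtering positions by prefix bracket counts; candidates[0]; string.find("]", start + 1).
def is_explosive_alt (string : String) : Bool × (Option Int × Option Int) :=
  let chars := string.toList
  let candidates := ((PySem.List.enumerate chars).filter
      (fun p => p.2 == '[' &&
        (((PySem.List.slice chars none (some p.1)).count '[' : Int)
          - ((PySem.List.slice chars none (some p.1)).count ']' : Int) == 4))).map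
      (fun p => p.1)
  match candidates with
  | [] => (false, (none, none))
  | start :: _ =>
    let e := PySem.Str.findFrom string "]" (start + 1)
    (true, (some start, if e ≠ -1 then some e else none))

-- ===== PRECONDITION & SPEC =====
-- Pre_ excludes exactly the strings on which A raises IndexError (pop from the empty stack):
-- a ']' at non-positive bracket balance that is not preceded by a ']' at bracket depth ≥ 5
-- (such an earlier ']' would have made A break before reaching the offending position).
def Pre_is_explosive (string : String) : Prop :=
  ∀ i, (hi : i < string.toList.length) → string.toList[i] = ']' →
    (string.toList.take i).count '[' ≤ (string.toList.take i).count ']' →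
    ∃ j, j < i ∧ ∃ hj : j < string.toList.length, string.toList[j] = ']' ∧
      5 + (string.toList.take j).count ']' ≤ (string.toList.take j).count '['
instance (string : String) : Decidable (Pre_is_explosive string) := by
  unfold Pre_is_explosive; infer_instance
def pvWitness_is_explosive : String := "[[[[[1,2]]]]]"

def Spec_is_explosive (string : String) (out : Bool × (Option Int × Option Int)) : Prop := out = is_explosive_alt string
instance (string : String) (out : Bool × (Option Int × Option Int)) : Decidable (Spec_is_explosive string out) := by unfold Spec_is_explosive; infer_instance

-- ===== CLAIM (what is proved, stated in full; the proofs are below) =====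
def Claim_equal_is_explosive : Prop := ∀ (string : String), Dom_is_explosive string → Pre_is_explosive string → Spec_is_explosive string (is_explosive string)

-- ===== LEMMAS AND PROOFS =====

-- B's comprehension condition at index k (as a Prop on the full char list)
def pvPred (cs : List Char) (k : Nat) : Prop :=
  ∃ _ : k < cs.length, cs[k] = '[' ∧
    ((cs.take k).count '[' : Int) - ((cs.take k).count ']' : Int) = 4

-- B's comprehension condition, the literal Bool test from the port
def pvQb (cs : List Char) (p : Int × Char) : Bool :=
  p.2 == '[' &&
    (((PySem.List.slice cs none (some p.1)).count '[' : Int)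
      - ((PySem.List.slice cs none (some p.1)).count ']' : Int) == 4)

theorem pvQb_iff (cs : List Char) (k : Nat) (hk : k < cs.length) :
    pvQb cs ((k : Int), cs[k]) = true ↔ pvPred cs k := by
  unfold pvQb pvPred
  rw [PySem.List.slice_to_natCast]
  simp [hk]

theorem pvAlt_eq (string : String) :
    is_explosive_alt string =
      match ((PySem.List.enumerate string.toList).filter (pvQb string.toList)).map
          (fun p => p.1) with
      | [] => (false, (none, none))
      | start :: _ =>
        (true, (some start,
          if PySem.Str.findFrom string "]" (start + 1) ≠ -1
          then some (PySem.Str.findFrom string "]" (start + 1)) else none)) := rfl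

-- index (as Int, from offset i) of the first ']' in a char list; A's post-explosion phase
-- and B's str.find both compute this.
def pvFirstClose : List Char → Int → Option Int
  | [], _ => none
  | c :: rest, i => if c = ']' then some i else pvFirstClose rest (i + 1)

-- the balance invariant carried through the pre-explosion phase: any ']' seen at depth 0
-- must be shielded by an earlier ']' at depth ≥ 5 (where A breaks first)
def pvQ (rest : List Char) (d : Nat) : Prop :=
  ∀ k, (hk : k < rest.length) → rest[k] = ']' →
    d + (rest.take k).count '[' ≤ (rest.take k).count ']' →
    ∃ j, j < k ∧ ∃ hj : j < rest.length, rest[j] = ']' ∧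
      5 + (rest.take j).count ']' ≤ d + (rest.take j).count '['

theorem pvPop_replicate (d : Nat) :
    PySem.List.pop? (List.replicate (d + 1) '[') = some ('[', List.replicate d '[') := by
  simp [PySem.List.pop?, PySem.List.pyIdx?]
  induction d with
  | zero => rfl
  | succ n ih => simpa [List.replicate_succ, List.eraseIdx] using ih

-- A's post-explosion phase returns the first ']' index (or none at end of string)
theorem pvA_post (rest : List Char) : ∀ (i : Int) (d : Nat) (s : Option Int),
    pvA_loop rest i (List.replicate (d + 5) '[') true s none =
      (true, (s, pvFirstClose rest i)) := by
  induction rest with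
  | nil => intro i d s; rfl
  | cons c rest ih =>
    intro i d s
    by_cases hc : c = '['
    · subst hc
      have h6 : List.replicate (d + 5) '[' ++ ['['] = List.replicate (d + 1 + 5) '[' := by
        rw [← List.replicate_succ']
      have hlen : ¬ ((List.replicate (d + 1 + 5) '[' : List Char).length = 5) := by
        simp only [List.length_replicate]; omega
      rw [pvA_loop, pvFirstClose, if_pos rfl]
      simp only [h6, hlen, if_false, if_neg (by decide : ¬('[' = ']'))]
      exact ih (i + 1) (d + 1) s
    · by_cases hc2 : c = ']'
      · subst hc2
        rw [pvA_loop, pvFirstClose]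
        have h5 : d + 5 = (d + 4) + 1 := by omega
        rw [if_neg hc, if_pos rfl, if_pos rfl, h5, pvPop_replicate]
        simp
      · rw [pvA_loop, pvFirstClose, if_neg hc, if_neg hc2, if_neg hc2, ih]

theorem pvFC_shift (cs : List Char) : ∀ (k : Int),
    pvFirstClose cs k = (pvFirstClose cs 0).map (fun t => k + t) := by
  induction cs with
  | nil => intro k; rfl
  | cons c rest ih =>
    intro k
    by_cases hc : c = ']'
    · simp [pvFirstClose, hc]
    · rw [pvFirstClose, pvFirstClose, if_neg hc, if_neg hc, ih (k + 1), ih (0 + 1)]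
      cases pvFirstClose rest 0
      · simp
      · simp; ring

theorem pvFC_nonneg (cs : List Char) : ∀ t, pvFirstClose cs 0 = some t → 0 ≤ t := by
  induction cs with
  | nil => intro t h; simp [pvFirstClose] at h
  | cons c rest ih =>
    intro t h
    by_cases hc : c = ']'
    · rw [pvFirstClose, if_pos hc] at h; simp at h; omega
    · rw [pvFirstClose, if_neg hc, pvFC_shift] at h
      cases hfc : pvFirstClose rest 0 with
      | none => rw [hfc] at h; simp at h
      | some t' => rw [hfc] at h; simp at h; have := ih t' hfc; omega

-- Chars.find.go for the single-char pattern "]" computes pvFirstClose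
theorem pvFind_close (cs : List Char) : ∀ (k : Nat),
    pvFirstClose cs (k : Int) =
      (if PySem.Chars.find.go [']'] cs k = -1 then none
       else some (PySem.Chars.find.go [']'] cs k)) := by
  induction cs with
  | nil => intro k; rw [PySem.Chars.find.go]; simp [pvFirstClose]
  | cons c rest ih =>
    intro k
    rw [PySem.Chars.find.go]
    by_cases hc : c = ']'
    · subst hc
      have hp : [']'].isPrefixOf (']' :: rest) = true := by simp [List.isPrefixOf]
      rw [pvFirstClose, if_pos rfl]
      simp [hp]
    · have hp : [']'].isPrefixOf (c :: rest) = false := by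
        simp [List.isPrefixOf]; intro h; exact absurd h.symm hc
      rw [pvFirstClose, if_neg hc]
      simp only [hp, Bool.false_eq_true, if_false]
      have := ih (k + 1)
      push_cast at this
      exact this

theorem pvQ_close_pos (rest : List Char) (d : Nat) (h : pvQ (']' :: rest) d) : 1 ≤ d := by
  by_contra hd
  obtain ⟨j, hj, _⟩ := h 0 (by simp) (by simp) (by simp; omega)
  omega

theorem pvQ_tail (c : Char) (rest : List Char) (d d' : Nat) (hd : d < 5)
    (hc : (c = '[' ∧ d' = d + 1) ∨ (c = ']' ∧ d = d' + 1) ∨ (¬c = '[' ∧ ¬c = ']' ∧ d' = d))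
    (h : pvQ (c :: rest) d) : pvQ rest d' := by
  intro k hk hcl hle
  have hsk : k + 1 < (c :: rest).length := by simp; omega
  have hscl : (c :: rest)[k + 1] = ']' := by simpa using hcl
  have hpre : d + ((c :: rest).take (k + 1)).count '[' ≤ ((c :: rest).take (k + 1)).count ']' := by
    rw [List.take_succ_cons]
    rcases hc with ⟨he, hd'⟩ | ⟨he, hd'⟩ | ⟨h1, h2, hd'⟩
    · simp [he]; omega
    · simp [he]; omega
    · simp [h1, h2]; omega
  obtain ⟨j, hjk, hjlen, hjc, hjle⟩ := h (k + 1) hsk hscl hpre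
  match j, hjk, hjlen, hjc, hjle with
  | 0, _, _, hjc, hjle =>
    simp at hjc hjle
    rcases hc with ⟨he, hd'⟩ | ⟨he, hd'⟩ | ⟨h1, h2, hd'⟩
    · rw [he] at hjc; exact absurd hjc (by decide)
    · omega
    · exact absurd hjc h2
  | j' + 1, hjk, hjlen, hjc, hjle =>
    refine ⟨j', by omega, by simpa using hjlen, by simpa using hjc, ?_⟩
    rw [List.take_succ_cons] at hjle
    rcases hc with ⟨he, hd'⟩ | ⟨he, hd'⟩ | ⟨h1, h2, hd'⟩
    · simp [he] at hjle ⊢; omega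
    · simp [he] at hjle ⊢; omega
    · simp [h1, h2] at hjle ⊢; omega

-- the explosion hand-off: B's find("]", n + 1) equals A's post-phase scan result
theorem pvHandoff (string : String) (n : Nat) (hn : n + 1 ≤ string.toList.length) :
    (if PySem.Str.findFrom string "]" ((n : Int) + 1) ≠ -1
     then some (PySem.Str.findFrom string "]" ((n : Int) + 1)) else none) =
      pvFirstClose (string.toList.drop (n + 1)) ((n : Int) + 1) := by
  have hcast : ((n : Int) + 1) = ((n + 1 : Nat) : Int) := by push_cast; ring
  rw [PySem.Str.findFrom_eq, hcast,
    PySem.Chars.findFrom_natCast string.toList "]".toList (n + 1) hn]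
  have htl : ("]" : String).toList = [']'] := by decide
  rw [htl]
  set cs := string.toList.drop (n + 1) with hcs
  have hfind : PySem.Chars.find cs [']'] = PySem.Chars.find.go [']'] cs 0 := rfl
  rw [pvFC_shift]
  have h0 := pvFind_close cs 0
  norm_num at h0
  rw [h0, ← hfind]
  by_cases hf : PySem.Chars.find cs [']'] = -1
  · simp [hf]
  · have hnn : 0 ≤ PySem.Chars.find cs [']'] := by
      apply pvFC_nonneg cs
      rw [h0, ← hfind]
      simp [hf]
    simp [hf]
    omega

-- if no index satisfies B's condition, B returns (false, (none, none))
theorem pvAlt_none (string : String)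
    (h : ∀ k, ¬ pvPred string.toList k) :
    is_explosive_alt string = (false, (none, none)) := by
  rw [pvAlt_eq]
  have hnil : (PySem.List.enumerate string.toList).filter (pvQb string.toList) = [] := by
    rw [List.filter_eq_nil_iff]
    intro p hp
    obtain ⟨k, hk, hpeq⟩ := (PySem.List.mem_enumerate_iff _ _ _).1 hp
    subst hpeq
    simp only [zero_add]
    intro hq
    exact h k ((pvQb_iff string.toList k hk).1 hq)
  rw [hnil]
  rfl

-- if n is the first index satisfying B's condition, B explodes there
theorem pvAlt_some (string : String) (n : Nat) (hn : n < string.toList.length)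
    (h : pvPred string.toList n) (hprev : ∀ k, k < n → ¬ pvPred string.toList k) :
    is_explosive_alt string =
      (true, (some (n : Int),
        if PySem.Str.findFrom string "]" ((n : Int) + 1) ≠ -1
        then some (PySem.Str.findFrom string "]" ((n : Int) + 1)) else none)) := by
  rw [pvAlt_eq]
  have hfind : (PySem.List.enumerate string.toList).find? (pvQb string.toList) =
      some ((n : Int), string.toList[n]) := by
    rw [List.find?_eq_some_iff_getElem]
    refine ⟨(pvQb_iff string.toList n hn).2 h, n, ?_, ?_, ?_⟩
    · simpa [PySem.List.length_enumerate] using hn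
    · rw [PySem.List.getElem_enumerate]; simp
    · intro j hj
      have hjlen : j < string.toList.length := by omega
      rw [PySem.List.getElem_enumerate]
      simp only [zero_add, Bool.not_eq_eq_eq_not, Bool.not_true]
      rw [← Bool.not_eq_true]
      intro hq
      exact hprev j hj ((pvQb_iff string.toList j hjlen).1 hq)
  rw [← List.head?_filter] at hfind
  obtain ⟨t, ht⟩ : ∃ t, (PySem.List.enumerate string.toList).filter (pvQb string.toList) =
      ((n : Int), string.toList[n]) :: t := by
    cases hl : (PySem.List.enumerate string.toList).filter (pvQb string.toList) with
    | nil => rw [hl] at hfind; simp at hfind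
    | cons a t => rw [hl] at hfind; simp at hfind; exact ⟨t, by rw [hfind]⟩
  rw [ht]
  rfl

-- main induction: while the stack stays below 5, A's walk reaches B's first candidate
theorem pvA_pre (string : String) : ∀ (rest : List Char) (n d : Nat),
    rest = string.toList.drop n → d < 5 → pvQ rest d →
    ((string.toList.take n).count '[' : Int) - ((string.toList.take n).count ']' : Int) = d →
    (∀ k, k < n → ¬ pvPred string.toList k) →
    pvA_loop rest (n : Int) (List.replicate d '[') false none none =
      is_explosive_alt string := by
  intro rest
  induction rest with
  | nil =>
    intro n d hdrop _ _ _ hprev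
    rw [pvA_loop, pvAlt_none]
    intro k hk
    obtain ⟨hklen, hkrest⟩ := hk
    have hlen : string.toList.length ≤ n := by
      have h2 := congrArg List.length hdrop
      simp only [List.length_nil, List.length_drop] at h2
      omega
    exact hprev k (by omega) ⟨hklen, hkrest⟩
  | cons c rest ih =>
    intro n d hdrop hd hq hcount hprev
    have hn : n < string.toList.length := by
      by_contra hge
      rw [List.drop_eq_nil_of_le (by omega)] at hdrop
      simp at hdrop
    have hcn : string.toList[n] = c := by
      have : (string.toList.drop n)[0]'(by rw [← hdrop]; simp) = c := by
        simp [← hdrop]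
      simpa using this
    have hrest : rest = string.toList.drop (n + 1) := by
      rw [← List.drop_drop, ← hdrop]
      simp
    have htake : string.toList.take (n + 1) = string.toList.take n ++ [c] := by
      rw [List.take_add_one, List.getElem?_eq_getElem hn, hcn]
      rfl
    have hcast : ((n + 1 : Nat) : Int) = (n : Int) + 1 := by push_cast; ring
    by_cases hc : c = '['
    · subst hc
      have hrep : List.replicate d '[' ++ ['['] = List.replicate (d + 1) '[' := by
        rw [← List.replicate_succ']
      by_cases h5 : d + 1 = 5
      · -- the explosion point: d = 4 and B's condition first holds at n
        have hd4 : d = 4 := by omega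
        subst hd4
        rw [pvAlt_some string n hn ⟨hn, hcn, hcount⟩ hprev]
        have hh := pvHandoff string n (by omega)
        rw [← hrest] at hh
        rw [pvA_loop]
        simp only [hrep]
        rw [if_pos (show (List.replicate (4 + 1) '[' : List Char).length = 5 by simp)]
        have hrep5 : (List.replicate (4 + 1) '[' : List Char) = List.replicate (0 + 5) '[' := by
          norm_num
        rw [hrep5, pvA_post, ← hh]
        simp
      · have hA5 : ¬ ((List.replicate (d + 1) '[' : List Char).length = 5) := by
          simp only [List.length_replicate]; omega
        have hQ2 : pvQ rest (d + 1) := pvQ_tail '[' rest d (d + 1) hd (Or.inl ⟨rfl, rfl⟩) hq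
        have hcount2 : ((string.toList.take (n + 1)).count '[' : Int)
            - ((string.toList.take (n + 1)).count ']' : Int) = (d + 1 : Nat) := by
          rw [htake]
          simp [List.count_append]
          omega
        have hprev2 : ∀ k, k < n + 1 → ¬ pvPred string.toList k := by
          intro k hk
          rcases Nat.lt_succ_iff_lt_or_eq.1 hk with hk' | rfl
          · exact hprev k hk'
          · rintro ⟨_, _, hdiff⟩
            rw [hcount] at hdiff
            omega
        have hih := ih (n + 1) (d + 1) hrest (by omega) hQ2 hcount2 hprev2
        rw [hcast] at hih
        rw [pvA_loop]
        simp only [hrep, hA5, if_false]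
        push_cast at hih ⊢
        exact hih
    · by_cases hc2 : c = ']'
      · subst hc2
        have hd1 : 1 ≤ d := pvQ_close_pos rest d hq
        have hrep : List.replicate d '[' = List.replicate ((d - 1) + 1) '[' := by
          congr 1; omega
        have hQ2 : pvQ rest (d - 1) := pvQ_tail ']' rest d (d - 1) hd
          (Or.inr (Or.inl ⟨rfl, by omega⟩)) hq
        have hcount2 : ((string.toList.take (n + 1)).count '[' : Int)
            - ((string.toList.take (n + 1)).count ']' : Int) = (d - 1 : Nat) := by
          rw [htake]
          simp [List.count_append]
          omega
        have hprev2 : ∀ k, k < n + 1 → ¬ pvPred string.toList k := by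
          intro k hk
          rcases Nat.lt_succ_iff_lt_or_eq.1 hk with hk' | rfl
          · exact hprev k hk'
          · rintro ⟨_, hch, _⟩
            rw [hcn] at hch
            exact absurd hch (by decide)
        have hih := ih (n + 1) (d - 1) hrest (by omega) hQ2 hcount2 hprev2
        rw [hcast] at hih
        rw [pvA_loop, if_neg hc, if_pos rfl, hrep, pvPop_replicate]
        simp only [Bool.false_eq_true, if_false]
        exact hih
      · have hcount2 : ((string.toList.take (n + 1)).count '[' : Int)
            - ((string.toList.take (n + 1)).count ']' : Int) = (d : Nat) := by
          rw [htake]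
          simp [List.count_append, hc, hc2]
          omega
        have hprev2 : ∀ k, k < n + 1 → ¬ pvPred string.toList k := by
          intro k hk
          rcases Nat.lt_succ_iff_lt_or_eq.1 hk with hk' | rfl
          · exact hprev k hk'
          · rintro ⟨_, hch, _⟩
            rw [hcn] at hch
            exact absurd hch hc
        have hih := ih (n + 1) d hrest hd (pvQ_tail c rest d d hd
          (Or.inr (Or.inr ⟨hc, hc2, rfl⟩)) hq) hcount2 hprev2
        rw [hcast] at hih
        rw [pvA_loop, if_neg hc, if_neg hc2]
        exact hih

-- ===== VERDICT (by name: the statement is the Claim_ definition above) =====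
theorem is_explosive_spec : Claim_equal_is_explosive := by
  intro string _ hpre
  unfold Spec_is_explosive
  have hq : pvQ string.toList 0 := by
    intro k hk hc hle
    obtain ⟨j, hj1, hj2, hj3, hj4⟩ := hpre k hk hc (by omega)
    exact ⟨j, hj1, hj2, hj3, by omega⟩
  have := pvA_pre string string.toList 0 0 (by simp) (by omega) hq (by simp) (by omega)
  simpa [is_explosive] using this
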